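-- pv_equiv track=rewrite | github.com/Afolab62/Directed-Evolution-Portal | backend/services/fingerprint_plot.py | _assign_label_rows
-- ===== SOURCE A (Python) =====
-- def _assign_label_rows(positions: list[int], min_gap: int = 30) -> list[int]:
--     """
--     Assign a vertical row index to each mutation so labels at nearby
--     positions do not collide (greedy left-to-right sweep).
--     """
--     row_last: list[int] = []
--     rows: list[int] = []
--     for pos in positions:
--         placed = False
--         for idx, last in enumerate(row_last):
--             if pos - last >= min_gap:
--                 row_last[idx] = pos
--                 rows.append(idx)
--                 placed = True
--                 break
--         if not placed:
--             rows.append(len(row_last))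
--             row_last.append(pos)
--     return rows
-- ===== SOURCE B (Python) =====
-- def _assign_label_rows(positions: list[int], min_gap: int = 30) -> list[int]:
--     """Same greedy row assignment, but the inner linear scan for the first
--     row with last <= pos - min_gap is replaced by a min-segment-tree descent
--     (O(n log n) instead of O(n * rows))."""
--     n = len(positions)
--     size, depth = 1, 0
--     while size < n:
--         size *= 2
--         depth += 1
--
--     # perfect binary tree of the given depth; node = [minval, left, right],
--     # leaf = [val]; minval None means "no occupied row in this subtree".
--     def build(d):
--         if d == 0:
--             return [None]
--         return [None, build(d - 1), build(d - 1)]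
--
--     def update(d, t, i, v):
--         if d == 0:
--             t[0] = v
--             return
--         half = 1 << (d - 1)
--         if i < half:
--             update(d - 1, t[1], i, v)
--         else:
--             update(d - 1, t[2], i - half, v)
--         m1, m2 = t[1][0], t[2][0]
--         t[0] = m2 if m1 is None else (m1 if m2 is None else min(m1, m2))
--
--     def query(d, t, x):
--         # leftmost leaf index whose value is <= x, or None
--         m = t[0]
--         if m is None or m > x:
--             return None
--         if d == 0:
--             return 0
--         res = query(d - 1, t[1], x)
--         if res is not None:
--             return res
--         res = query(d - 1, t[2], x)
--         if res is None:
--             return None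
--         return (1 << (d - 1)) + res
--
--     tree = build(depth)
--     count = 0
--     rows: list[int] = []
--     for pos in positions:
--         idx = query(depth, tree, pos - min_gap)
--         if idx is None:
--             idx = count
--             count += 1
--         update(depth, tree, idx, pos)
--         rows.append(idx)
--     return rows
-- ===== Notes on version B (the rewrite author's own statement) =====
-- stated objective: faster
-- what changed: A's inner linear scan of row_last for the first row with pos - last >= min_gap is replaced by a min-segment-tree (tournament tree) descent that finds the leftmost occupied row with last <= pos - min_gap in O(log n).
import Mathlib
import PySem

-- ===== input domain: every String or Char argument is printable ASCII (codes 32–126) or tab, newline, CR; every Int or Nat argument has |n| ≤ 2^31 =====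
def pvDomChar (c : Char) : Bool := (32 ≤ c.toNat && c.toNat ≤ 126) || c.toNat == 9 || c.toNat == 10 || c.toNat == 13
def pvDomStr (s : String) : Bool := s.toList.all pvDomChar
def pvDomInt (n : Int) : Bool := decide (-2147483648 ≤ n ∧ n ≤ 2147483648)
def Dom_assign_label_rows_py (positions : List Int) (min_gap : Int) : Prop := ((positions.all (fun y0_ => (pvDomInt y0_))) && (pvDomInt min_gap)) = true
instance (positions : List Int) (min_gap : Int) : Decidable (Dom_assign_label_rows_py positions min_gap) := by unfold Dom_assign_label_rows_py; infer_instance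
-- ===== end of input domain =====

-- B replaces A's inner linear scan over the rows by a min-segment-tree descent
-- (leftmost row with last <= pos - min_gap), turning O(n * rows) into O(n log n).

-- ===== PORT A =====
-- A's inner 'for idx, last in enumerate(row_last): if pos - last >= min_gap: break':
-- first index whose last value satisfies the gap, or none.
def scanA (pos min_gap : Int) : List Int → Option Nat
  | [] => none
  | last :: rest =>
      if pos - last ≥ min_gap then some 0
      else (scanA pos min_gap rest).map (· + 1)

-- one iteration of A's outer loop over (row_last, rows)
def stepA (min_gap : Int) (st : List Int × List Int) (pos : Int) : List Int × List Int :=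
  match scanA pos min_gap st.1 with
  | some idx => (st.1.set idx pos, st.2 ++ [(idx : Int)])
  | none => (st.1 ++ [pos], st.2 ++ [(st.1.length : Int)])

def assign_label_rows_py (positions : List Int) (min_gap : Int) : List Int :=
  (positions.foldl (stepA min_gap) (([] : List Int), ([] : List Int))).2

-- ===== PORT B =====
-- perfect binary min-tree; `none` at a leaf = "row not yet occupied"
inductive STree
  | leaf : Option Int → STree
  | node : Option Int → STree → STree → STree
deriving Repr, DecidableEq

-- Python's `m2 if m1 is None else (m1 if m2 is None else min(m1, m2))`
def omin (a b : Option Int) : Option Int :=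
  match a, b with
  | none, b => b
  | a, none => a
  | some x, some y => some (min x y)

def mval : STree → Option Int
  | .leaf o => o
  | .node m _ _ => m

def buildT : Nat → STree
  | 0 => .leaf none
  | d + 1 => .node none (buildT d) (buildT d)

def updT : Nat → STree → Nat → Int → STree
  | 0, _, _, v => .leaf (some v)
  | d + 1, .node _ l r, i, v =>
      if i < 2 ^ d then
        let l' := updT d l i v
        .node (omin (mval l') (mval r)) l' r
      else
        let r' := updT d r (i - 2 ^ d) v
        .node (omin (mval l) (mval r')) l r'
  | _ + 1, t, _, _ => t  -- unreachable for well-formed trees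

def qryT : Nat → STree → Int → Option Nat
  | 0, t, x =>
      match mval t with
      | none => none
      | some m => if m ≤ x then some 0 else none
  | d + 1, .node mo l r, x =>
      match mo with
      | none => none
      | some m =>
          if m ≤ x then
            match qryT d l x with
            | some i => some i
            | none => (qryT d r x).map (fun j => 2 ^ d + j)
          else none
  | _ + 1, _, _ => none  -- unreachable for well-formed trees

-- Python's `size, depth = 1, 0; while size < n: size *= 2; depth += 1`
-- (the `1 ≤ size` guard only makes the same computation total; B calls it with size = 1)
def capk (n size k : Nat) : Nat :=
  if h : size < n ∧ 1 ≤ size then capk n (2 * size) (k + 1) else k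
termination_by n - size
decreasing_by omega

-- one iteration of B's loop over (tree, count, rows)
def stepB (min_gap : Int) (d : Nat) (st : STree × Nat × List Int) (pos : Int) :
    STree × Nat × List Int :=
  match qryT d st.1 (pos - min_gap) with
  | some i => (updT d st.1 i pos, st.2.1, st.2.2 ++ [(i : Int)])
  | none => (updT d st.1 st.2.1 pos, st.2.1 + 1, st.2.2 ++ [(st.2.1 : Int)])

def assign_label_rows_py_alt (positions : List Int) (min_gap : Int) : List Int :=
  let d := capk positions.length 1 0
  (positions.foldl (stepB min_gap d) (buildT d, 0, ([] : List Int))).2.2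

-- ===== PRECONDITION & SPEC =====
def Spec_assign_label_rows_py (positions : List Int) (min_gap : Int) (out : List Int) : Prop := out = assign_label_rows_py_alt positions min_gap
instance (positions : List Int) (min_gap : Int) (out : List Int) : Decidable (Spec_assign_label_rows_py positions min_gap out) := by unfold Spec_assign_label_rows_py; infer_instance

-- ===== CLAIM (what is proved, stated in full; the proofs are below) =====
def Claim_equal_assign_label_rows_py : Prop := ∀ (positions : List Int) (min_gap : Int), Dom_assign_label_rows_py positions min_gap → Spec_assign_label_rows_py positions min_gap (assign_label_rows_py positions min_gap)

-- ===== LEMMAS AND PROOFS =====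

def leavesT : STree → List (Option Int)
  | .leaf o => [o]
  | .node _ l r => leavesT l ++ leavesT r

inductive WfT : Nat → STree → Prop
  | leaf (o) : WfT 0 (.leaf o)
  | node (m l r k) : WfT k l → WfT k r → m = omin (mval l) (mval r) → WfT (k + 1) (.node m l r)

theorem omin_none_right (a : Option Int) : omin a none = a := by cases a <;> rfl

theorem omin_assoc (a b c : Option Int) : omin (omin a b) c = omin a (omin b c) := by
  cases a <;> cases b <;> cases c <;> simp [omin, min_assoc]

theorem mval_buildT (d : Nat) : mval (buildT d) = none := by cases d <;> rfl

theorem wfT_buildT (d : Nat) : WfT d (buildT d) := by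
  induction d with
  | zero => exact WfT.leaf none
  | succ d ih =>
      exact WfT.node none (buildT d) (buildT d) d ih ih (by simp [mval_buildT, omin])

theorem leavesT_buildT (d : Nat) : leavesT (buildT d) = List.replicate (2 ^ d) none := by
  induction d with
  | zero => rfl
  | succ d ih =>
      simp only [buildT, leavesT, ih]
      rw [← List.replicate_add]
      congr 1
      ring

theorem length_leavesT {d : Nat} {t : STree} (h : WfT d t) : (leavesT t).length = 2 ^ d := by
  induction h with
  | leaf o => rfl
  | node m l r k hl hr hm ihl ihr => simp [leavesT, ihl, ihr]; ring

theorem foldr_omin_init (l : List (Option Int)) (b : Option Int) :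
    l.foldr omin b = omin (l.foldr omin none) b := by
  induction l with
  | nil => simp [omin]
  | cons a l ih => simp [List.foldr_cons, ih, omin_assoc]

theorem mval_foldr {d : Nat} {t : STree} (h : WfT d t) :
    mval t = (leavesT t).foldr omin none := by
  induction h with
  | leaf o => simp [mval, leavesT, omin_none_right]
  | node m l r k hl hr hm ihl ihr =>
      simp only [mval, leavesT]
      rw [hm, ihl, ihr, List.foldr_append, foldr_omin_init (leavesT l) (List.foldr omin none (leavesT r))]

theorem foldr_omin_le {l : List (Option Int)} {v : Int} (h : some v ∈ l) :
    ∃ μ, l.foldr omin none = some μ ∧ μ ≤ v := by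
  induction l with
  | nil => simp at h
  | cons a l ih =>
      rcases List.mem_cons.mp h with h | h
      · subst h
        rcases hr : l.foldr omin none with _ | w
        · exact ⟨v, by simp [List.foldr_cons, hr, omin], le_refl v⟩
        · exact ⟨min v w, by simp [List.foldr_cons, hr, omin], min_le_left _ _⟩
      · obtain ⟨μ, hμ, hle⟩ := ih h
        cases a with
        | none => exact ⟨μ, by simp [List.foldr_cons, hμ, omin], hle⟩
        | some w => exact ⟨min w μ, by simp [List.foldr_cons, hμ, omin], le_trans (min_le_right _ _) hle⟩

def predQ (x : Int) (o : Option Int) : Bool :=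
  match o with
  | some v => decide (v ≤ x)
  | none => false

theorem qryT_eq_findIdx? {d : Nat} {t : STree} (h : WfT d t) (x : Int) :
    qryT d t x = (leavesT t).findIdx? (predQ x) := by
  induction h with
  | leaf o =>
      cases o with
      | none => simp [qryT, mval, leavesT, List.findIdx?_cons, predQ]
      | some v =>
          by_cases hv : v ≤ x <;>
            simp [qryT, mval, leavesT, List.findIdx?_cons, predQ, hv]
  | node m l r k hl hr hm ihl ihr =>
      have hnone : ∀ (hmx : ¬ ∃ μ, m = some μ ∧ μ ≤ x),
          (leavesT l ++ leavesT r).findIdx? (predQ x) = none := by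
        intro hmx
        rw [List.findIdx?_eq_none_iff]
        intro o ho
        cases o with
        | none => rfl
        | some v =>
            by_cases hvx : v ≤ x
            · exfalso
              obtain ⟨μ, hμ, hle⟩ := foldr_omin_le (l := leavesT l ++ leavesT r) (v := v) ho
              have : m = some μ := by
                rw [hm, mval_foldr hl, mval_foldr hr, ← foldr_omin_init, ← List.foldr_append, hμ]
              exact hmx ⟨μ, this, le_trans hle hvx⟩
            · simp [predQ, hvx]
      cases m with
      | none =>
          simp only [qryT, leavesT]
          exact (hnone (by rintro ⟨μ, hμ, _⟩; simp at hμ)).symm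
      | some μ =>
          by_cases hμx : μ ≤ x
          · simp only [qryT, leavesT, hμx, if_pos]
            rw [List.findIdx?_append, ihl, ihr]
            cases (leavesT l).findIdx? (predQ x) with
            | some i => simp [Option.or]
            | none =>
                simp only [Option.or]
                cases (leavesT r).findIdx? (predQ x) with
                | none => rfl
                | some j => simp [length_leavesT hl, Nat.add_comm]
          · simp only [qryT, leavesT, hμx, if_neg, not_false_iff]
            exact (hnone (by rintro ⟨ν, hν, hle⟩; cases hν; exact hμx hle)).symm

theorem updT_spec {d : Nat} {t : STree} (h : WfT d t) :
    ∀ i v, i < 2 ^ d →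
      WfT d (updT d t i v) ∧ leavesT (updT d t i v) = (leavesT t).set i (some v) := by
  induction h with
  | leaf o =>
      intro i v hi
      interval_cases i
      exact ⟨WfT.leaf _, rfl⟩
  | node m l r k hl hr hm ihl ihr =>
      intro i v hi
      by_cases hik : i < 2 ^ k
      · obtain ⟨hwf, hlv⟩ := ihl i v hik
        refine ⟨?_, ?_⟩
        · simpa [updT, hik] using WfT.node _ _ _ _ hwf hr rfl
        · simp [updT, hik, leavesT, hlv, length_leavesT hl]
      · have hik2 : i - 2 ^ k < 2 ^ k := by
          have : 2 ^ (k + 1) = 2 ^ k + 2 ^ k := by ring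
          omega
        obtain ⟨hwf, hlv⟩ := ihr (i - 2 ^ k) v hik2
        refine ⟨?_, ?_⟩
        · simpa [updT, hik] using WfT.node _ _ _ _ hl hwf rfl
        · simp [updT, hik, leavesT, hlv, List.set_append, length_leavesT hl]

theorem capk_ge (n : Nat) : ∀ size k, 1 ≤ size → size = 2 ^ k → n ≤ 2 ^ capk n size k := by
  intro size k h1 h2
  unfold capk
  split
  · next h =>
      exact capk_ge n (2 * size) (k + 1) (by omega) (by rw [h2]; ring)
  · next h => omega
termination_by size => n - size
decreasing_by omega

theorem scanA_eq_findIdx? (pos g : Int) (l : List Int) :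
    scanA pos g l = l.findIdx? (fun last => decide (g ≤ pos - last)) := by
  induction l with
  | nil => rfl
  | cons a l ih =>
      by_cases ha : pos - a ≥ g <;>
        simp [scanA, List.findIdx?_cons, ih, ha, ge_iff_le]

theorem findIdx?_lt_length {α : Type} {p : α → Bool} {l : List α} {i : Nat}
    (h : l.findIdx? p = some i) : i < l.length := by
  induction l generalizing i with
  | nil => simp at h
  | cons a l ih =>
      rw [List.findIdx?_cons] at h
      split at h
      · cases h; simp
      · cases hj : l.findIdx? p with
        | none => rw [hj] at h; simp at h
        | some j =>
            rw [hj] at h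
            simp at h
            have := ih hj
            simp [← h]
            omega

-- predicate bridge: row-scan condition = leaf condition under `some`
theorem pred_bridge (pos g : Int) :
    (fun last => decide (g ≤ pos - last)) = (predQ (pos - g) ∘ some) := by
  funext last
  simp [predQ, Function.comp]
  constructor <;> intro h <;> omega

theorem findIdx?_replicate_none (x : Int) (m : Nat) :
    (List.replicate m (none : Option Int)).findIdx? (predQ x) = none := by
  simp [List.findIdx?_replicate, predQ]

-- the main loop invariant: A's (row_last, rows) and B's (tree, count, rows) run in lockstep
theorem loop_eq (g : Int) (d : Nat) :
    ∀ (ps rl : List Int) (t : STree) (rows : List Int),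
      WfT d t →
      leavesT t = rl.map some ++ List.replicate (2 ^ d - rl.length) none →
      rl.length + ps.length ≤ 2 ^ d →
      (ps.foldl (stepA g) (rl, rows)).2 = (ps.foldl (stepB g d) (t, rl.length, rows)).2.2 := by
  intro ps
  induction ps with
  | nil => intro rl t rows _ _ _; rfl
  | cons pos ps ih =>
      intro rl t rows hwf hlv hlen
      have hrl_le : rl.length ≤ 2 ^ d := by simp at hlen; omega
      have hq : qryT d t (pos - g) = scanA pos g rl := by
        rw [qryT_eq_findIdx? hwf, hlv, List.findIdx?_append, findIdx?_replicate_none,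
          Option.map_none, Option.or_none, List.findIdx?_map, scanA_eq_findIdx?,
          pred_bridge pos g]
      simp only [List.foldl_cons]
      rcases hscan : scanA pos g rl with _ | idx
      · -- no row fits: both append a new row at index rl.length
        have hcnt : rl.length < 2 ^ d := by simp at hlen; omega
        obtain ⟨hwf', hlv'⟩ := updT_spec hwf rl.length pos hcnt
        have hstepA : stepA g (rl, rows) pos = (rl ++ [pos], rows ++ [(rl.length : Int)]) := by
          simp [stepA, hscan]
        have hstepB : stepB g d (t, rl.length, rows) pos =
            (updT d t rl.length pos, rl.length + 1, rows ++ [(rl.length : Int)]) := by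
          simp [stepB, hq, hscan]
        rw [hstepA, hstepB]
        have hrep : 2 ^ d - rl.length = (2 ^ d - (rl.length + 1)) + 1 := by omega
        have hlv'' : leavesT (updT d t rl.length pos) =
            (rl ++ [pos]).map some ++ List.replicate (2 ^ d - (rl ++ [pos]).length) none := by
          rw [hlv', hlv, hrep, List.replicate_succ, List.set_append]
          simp
        have := ih (rl ++ [pos]) (updT d t rl.length pos) (rows ++ [(rl.length : Int)])
          hwf' hlv'' (by simp at hlen ⊢; omega)
        simpa using this
      · -- row idx fits: both update row idx in place
        have hidx : idx < rl.length := by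
          have := findIdx?_lt_length (scanA_eq_findIdx? pos g rl ▸ hscan)
          simpa using this
        obtain ⟨hwf', hlv'⟩ := updT_spec hwf idx pos (lt_of_lt_of_le hidx hrl_le)
        have hstepA : stepA g (rl, rows) pos = (rl.set idx pos, rows ++ [(idx : Int)]) := by
          simp [stepA, hscan]
        have hstepB : stepB g d (t, rl.length, rows) pos =
            (updT d t idx pos, rl.length, rows ++ [(idx : Int)]) := by
          simp [stepB, hq, hscan]
        rw [hstepA, hstepB]
        have hlv'' : leavesT (updT d t idx pos) =
            (rl.set idx pos).map some ++ List.replicate (2 ^ d - (rl.set idx pos).length) none := by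
          rw [hlv', hlv, List.set_append, List.map_set]
          simp [hidx]
        have := ih (rl.set idx pos) (updT d t idx pos) (rows ++ [(idx : Int)])
          hwf' hlv'' (by simp at hlen ⊢; omega)
        simpa using this

-- ===== VERDICT (by name: the statement is the Claim_ definition above) =====
theorem assign_label_rows_py_spec : Claim_equal_assign_label_rows_py := by
  intro positions min_gap _
  unfold Spec_assign_label_rows_py assign_label_rows_py assign_label_rows_py_alt
  have hcap := capk_ge positions.length 1 0 (le_refl 1) (by norm_num)
  have := loop_eq min_gap (capk positions.length 1 0) positions [] (buildT _) []
    (wfT_buildT _) (by simp [leavesT_buildT]) (by simpa using hcap)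
  simpa using this
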